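-- pv_equiv track=rewrite | github.com/ZJF20712/Custom_E310_UHD_HW_SW | fpga/usrp3/lib/rfnoc/crossbar/gen_node_to_coord_mapping.py | gen_spiral
-- ===== SOURCE A (Python) =====
-- import math
--
-- def gen_spiral(N):
--     nodes = dict()
--     x = y = 0
--     dx = 0
--     dy = -1
--     for i in range(N**2):
--         if (-N/2 < x <= N/2) and (-N/2 < y <= N/2):
--             nodes[i] = (x + int(math.ceil(N/2)) - 1, y + int(math.ceil(N/2)) - 1)
--         if x == y or (x < 0 and x == -y) or (x > 0 and x == 1-y):
--             dx, dy = -dy, dx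
--         x, y = x+dx, y+dy
--     return nodes
-- ===== SOURCE B (Python) =====
-- import math
--
-- def gen_spiral(N):
--     # Segment-based spiral walk: run lengths grow by one every second segment,
--     # cycling the four direction vectors; no per-step turn detection or box test.
--     nodes = dict()
--     n = max(N, 0) ** 2
--     off = int(math.ceil(N / 2)) - 1
--     x = y = 0
--     i = 0
--     if i < n:
--         nodes[i] = (x + off, y + off)
--         i += 1
--     dirs = [(1, 0), (0, 1), (-1, 0), (0, -1)]
--     seg = 0
--     while i < n:
--         dx, dy = dirs[seg % 4]
--         for _ in range(seg // 2 + 1):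
--             if i >= n:
--                 break
--             x += dx
--             y += dy
--             nodes[i] = (x + off, y + off)
--             i += 1
--         seg += 1
--     return nodes
-- ===== Notes on version B (the rewrite author's own statement) =====
-- stated objective: faster
-- what changed: B walks the spiral segment-by-segment with precomputed run lengths (each length used twice per lap) cycling through the four direction vectors and emits every visited cell directly, instead of A's per-step turn-predicate test and inside-the-box membership test on every iteration.
import Mathlib
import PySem

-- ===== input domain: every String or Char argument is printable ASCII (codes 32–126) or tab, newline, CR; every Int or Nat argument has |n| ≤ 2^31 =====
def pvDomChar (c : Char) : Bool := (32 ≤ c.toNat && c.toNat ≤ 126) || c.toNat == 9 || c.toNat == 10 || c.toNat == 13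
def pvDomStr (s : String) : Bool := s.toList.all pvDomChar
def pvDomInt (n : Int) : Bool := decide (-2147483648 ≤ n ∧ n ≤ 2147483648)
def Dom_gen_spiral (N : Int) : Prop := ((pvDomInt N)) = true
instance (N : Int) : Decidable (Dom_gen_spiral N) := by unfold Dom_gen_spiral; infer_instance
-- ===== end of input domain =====

-- B re-implements the spiral by precomputed run lengths (growing by one every second segment)
-- through the four direction vectors instead of A's per-step turn test and inside-the-box test;
-- measurably faster by a constant factor, same return value.

-- ===== PORT A =====
-- int(math.ceil(N/2)): exact integer ceiling division (the float N/2 is exact on the stated domain)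
def pvCeilHalf (N : Int) : Int := -(PySem.Int.floordiv (-N) 2)

-- loop body of A's for-loop (box test `-N/2 < x <= N/2` ported exactly as -N < 2*x ∧ 2*x ≤ N:
-- the float N/2 is a dyadic rational, so the comparison with the int x is exact on the domain)
def pvBodyA (N : Int) (st : PySem.Dict Int (Int × Int) × Int × Int × Int × Int) (i : Int) :
    PySem.Dict Int (Int × Int) × Int × Int × Int × Int :=
  let x := st.2.1; let y := st.2.2.1; let dx := st.2.2.2.1; let dy := st.2.2.2.2
  let d := if (-N < 2 * x ∧ 2 * x ≤ N) ∧ (-N < 2 * y ∧ 2 * y ≤ N) then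
             st.1.insert i (x + pvCeilHalf N - 1, y + pvCeilHalf N - 1) else st.1
  let p := if x = y ∨ (x < 0 ∧ x = -y) ∨ (0 < x ∧ x = 1 - y) then (-dy, dx) else (dx, dy)
  (d, x + p.1, y + p.2, p.1, p.2)

def gen_spiral (N : Int) : List (Int × Int × Int) :=
  (((PySem.List.pyRange 0 (N ^ 2) 1).foldl (pvBodyA N)
    (PySem.Dict.empty, 0, 0, 0, -1))).1.items

-- ===== PORT B =====
-- inner `for _ in range(steps)` loop of Source B, with its `if i >= n: break`
def pvBInner (steps : Nat) (n i x y dx dy off : Int) (d : PySem.Dict Int (Int × Int)) :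
    PySem.Dict Int (Int × Int) × Int × Int × Int :=
  match steps with
  | 0 => (d, i, x, y)
  | steps + 1 =>
    if n ≤ i then (d, i, x, y)
    else pvBInner steps n (i + 1) (x + dx) (y + dy) dx dy off (d.insert i (x + dx + off, y + dy + off))

-- termination facts for the while-loop port (cited by pvBOuter's decreasing_by)
lemma pvBInner_i_le (steps : Nat) : ∀ n i x y dx dy off d,
    i ≤ (pvBInner steps n i x y dx dy off d).2.1 := by
  induction steps with
  | zero => intro n i x y dx dy off d; simp [pvBInner]
  | succ s ih =>
    intro n i x y dx dy off d
    simp only [pvBInner]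
    split
    · simp
    · exact le_trans (by omega) (ih n (i+1) (x+dx) (y+dy) dx dy off _)

lemma pvBInner_i_lt (steps : Nat) (n i x y dx dy off : Int) (d : PySem.Dict Int (Int × Int))
    (h : i < n) (hs : steps ≠ 0) : i < (pvBInner steps n i x y dx dy off d).2.1 := by
  cases steps with
  | zero => exact absurd rfl hs
  | succ s =>
    simp only [pvBInner]
    rw [if_neg (by omega)]
    exact lt_of_lt_of_le (by omega) (pvBInner_i_le s n (i+1) (x+dx) (y+dy) dx dy off _)

-- dirs[seg % 4] of Source B
def pvDirAt (seg : Nat) : Int × Int :=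
  PySem.List.pyGetD ([((1:Int),(0:Int)),(0,1),(-1,0),(0,-1)] : List (Int × Int))
    ((seg % 4 : Nat) : Int) (0, 0)

-- `while i < n:` loop of Source B
def pvBOuter (n i : Int) (seg : Nat) (x y off : Int) (d : PySem.Dict Int (Int × Int)) :
    PySem.Dict Int (Int × Int) :=
  if h : i < n then
    let r := pvBInner (seg / 2 + 1) n i x y (pvDirAt seg).1 (pvDirAt seg).2 off d
    pvBOuter n r.2.1 (seg + 1) r.2.2.1 r.2.2.2 off r.1
  else d
termination_by (n - i).toNat
decreasing_by
  have := pvBInner_i_lt (seg / 2 + 1) n i x y (pvDirAt seg).1 (pvDirAt seg).2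
    off d h (by omega)
  omega

def gen_spiral_alt (N : Int) : List (Int × Int × Int) :=
  let n : Int := (max N 0) ^ 2
  let off : Int := pvCeilHalf N - 1
  let st : PySem.Dict Int (Int × Int) × Int :=
    if (0 : Int) < n then ((PySem.Dict.empty).insert 0 (0 + off, 0 + off), 1)
    else (PySem.Dict.empty, 0)
  (pvBOuter n st.2 0 0 0 off st.1).items

-- ===== PRECONDITION & SPEC =====
def Spec_gen_spiral (N : Int) (out : List (Int × Int × Int)) : Prop := out = gen_spiral_alt N
instance (N : Int) (out : List (Int × Int × Int)) : Decidable (Spec_gen_spiral N out) := by unfold Spec_gen_spiral; infer_instance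

-- ===== CLAIM (what is proved, stated in full; the proofs are below) =====
def Claim_equal_gen_spiral : Prop := ∀ (N : Int), Dom_gen_spiral N → Spec_gen_spiral N (gen_spiral N)

-- ===== LEMMAS AND PROOFS =====

-- turn-then-move step of A's loop
def pvStep (s : Int × Int × Int × Int) : Int × Int × Int × Int :=
  let p := if s.1 = s.2.1 ∨ (s.1 < 0 ∧ s.1 = -s.2.1) ∨ (0 < s.1 ∧ s.1 = 1 - s.2.1)
           then (-s.2.2.2, s.2.2.1) else (s.2.2.1, s.2.2.2)
  (s.1 + p.1, s.2.1 + p.2, p.1, p.2)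

-- pure emission list of A's loop over k consecutive indices starting at a
def pvRunA (N : Int) : Nat → Int → (Int × Int × Int × Int) → List (Int × Int × Int)
  | 0, _, _ => []
  | k+1, a, s =>
    (if (-N < 2 * s.1 ∧ 2 * s.1 ≤ N) ∧ (-N < 2 * s.2.1 ∧ 2 * s.2.1 ≤ N)
      then [(a, s.1 + pvCeilHalf N - 1, s.2.1 + pvCeilHalf N - 1)] else [])
    ++ pvRunA N k (a+1) (pvStep s)

def pvIter : Nat → (Int × Int × Int × Int) → (Int × Int × Int × Int)
  | 0, s => s
  | k+1, s => pvIter k (pvStep s)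

lemma pvIter_succ' (k : Nat) : ∀ s, pvIter (k+1) s = pvStep (pvIter k s) := by
  induction k with
  | zero => intro s; rfl
  | succ k ih => intro s; rw [show k+1+1 = (k+1)+1 from rfl]; exact ih (pvStep s)

lemma pvRunA_add (N : Int) (t : Nat) : ∀ (r : Nat) (a : Int) s,
    pvRunA N (t + r) a s = pvRunA N t a s ++ pvRunA N r (a + t) (pvIter t s) := by
  induction t with
  | zero => intro r a s; simp [pvRunA, pvIter]
  | succ t ih =>
    intro r a s
    rw [show t + 1 + r = (t + r) + 1 from by omega]
    simp only [pvRunA]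
    rw [ih r (a+1) (pvStep s), List.append_assoc]
    have h1 : a + 1 + (t : Int) = a + ((t + 1 : Nat) : Int) := by push_cast; ring
    rw [h1]
    rfl

lemma pvBodyA_eq (N : Int) (d : PySem.Dict Int (Int × Int)) (s : Int × Int × Int × Int) (i : Int) :
    pvBodyA N (d, s) i =
      ((if (-N < 2 * s.1 ∧ 2 * s.1 ≤ N) ∧ (-N < 2 * s.2.1 ∧ 2 * s.2.1 ≤ N)
        then d.insert i (s.1 + pvCeilHalf N - 1, s.2.1 + pvCeilHalf N - 1) else d), pvStep s) := by
  rfl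

lemma pvNotContains (d : PySem.Dict Int (Int × Int)) (i : Int)
    (h : ∀ p ∈ d.items, p.1 < i) : d.contains i = false := by
  by_contra hc
  have hmem : i ∈ d.keys := (PySem.Dict.contains_iff_mem_keys d i).mp (by
    cases hcc : d.contains i
    · exact absurd hcc hc
    · rfl)
  have : d.keys = d.items.map (·.1) := rfl
  rw [this] at hmem
  obtain ⟨p, hp, hpi⟩ := List.mem_map.mp hmem
  have := h p hp
  omega

lemma pvFoldA (N : Int) (k : Nat) : ∀ (a : Int) (s : Int × Int × Int × Int)
    (d : PySem.Dict Int (Int × Int)), (∀ p ∈ d.items, p.1 < a) →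
    ((PySem.List.pyRange a (a + (k : Int)) 1).foldl (pvBodyA N) (d, s)).1.items
      = d.items ++ pvRunA N k a s := by
  induction k with
  | zero =>
    intro a s d hd
    rw [show a + ((0:Nat):Int) = a from by push_cast; ring,
      PySem.List.pyRange_one_eq_nil (le_refl a)]
    simp [pvRunA]
  | succ k ih =>
    intro a s d hd
    have hab : a < a + ((k+1:Nat):Int) := by push_cast; omega
    rw [PySem.List.pyRange_one_cons hab, List.foldl_cons, pvBodyA_eq,
      show a + ((k+1:Nat):Int) = (a+1) + ((k:Nat):Int) from by push_cast; ring]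
    by_cases hg : (-N < 2*s.1 ∧ 2*s.1 ≤ N) ∧ (-N < 2*s.2.1 ∧ 2*s.2.1 ≤ N)
    · rw [if_pos hg]
      have hins := PySem.Dict.items_insert_of_not_contains d
        (s.1 + pvCeilHalf N - 1, s.2.1 + pvCeilHalf N - 1) (pvNotContains d a hd)
      have hd' : ∀ p ∈ (d.insert a (s.1 + pvCeilHalf N - 1, s.2.1 + pvCeilHalf N - 1)).items,
          p.1 < a + 1 := by
        intro p hp
        rw [hins] at hp
        rcases List.mem_append.mp hp with h | h
        · exact lt_trans (hd p h) (by omega)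
        · rw [List.mem_singleton] at h; subst h; exact (by omega : a < a + 1)
      rw [ih (a+1) (pvStep s) _ hd', hins]
      simp only [pvRunA]
      rw [if_pos hg]
      simp
    · rw [if_neg hg]
      have hd' : ∀ p ∈ d.items, p.1 < a + 1 := fun p hp => lt_trans (hd p hp) (by omega)
      rw [ih (a+1) (pvStep s) d hd']
      simp only [pvRunA]
      rw [if_neg hg]
      simp

lemma gen_spiral_alt_eq (N : Int) :
    gen_spiral_alt N
      = (pvBOuter ((max N 0)^2)
          (if (0:Int) < (max N 0)^2
            then (((PySem.Dict.empty : PySem.Dict Int (Int × Int)).insert 0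
                    (0 + (pvCeilHalf N - 1), 0 + (pvCeilHalf N - 1))), (1:Int))
            else (PySem.Dict.empty, 0)).2
          0 0 0 (pvCeilHalf N - 1)
          (if (0:Int) < (max N 0)^2
            then (((PySem.Dict.empty : PySem.Dict Int (Int × Int)).insert 0
                    (0 + (pvCeilHalf N - 1), 0 + (pvCeilHalf N - 1))), (1:Int))
            else (PySem.Dict.empty, 0)).1).items := rfl

lemma gen_spiral_eq_runA (N : Int) : gen_spiral N = pvRunA N (N ^ 2).toNat 0 (0, 0, 0, -1) := by
  have h2 : (0 : Int) ≤ N ^ 2 := sq_nonneg N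
  unfold gen_spiral
  have hr : PySem.List.pyRange 0 (N ^ 2) 1
      = PySem.List.pyRange 0 (0 + (((N ^ 2).toNat : Nat) : Int)) 1 := by
    congr 1; omega
  rw [hr, pvFoldA N (N ^ 2).toNat 0 (0, 0, 0, -1) PySem.Dict.empty (by simp [PySem.Dict.empty])]
  simp [PySem.Dict.empty]

-- pure mirrors of Source B's loops
def pvInnerP (steps : Nat) (n i x y dx dy off : Int) :
    List (Int × Int × Int) × Int × Int × Int :=
  match steps with
  | 0 => ([], i, x, y)
  | steps + 1 =>
    if n ≤ i then ([], i, x, y)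
    else
      let r := pvInnerP steps n (i + 1) (x + dx) (y + dy) dx dy off
      ((i, x + dx + off, y + dy + off) :: r.1, r.2)

lemma pvInnerP_i_le (steps : Nat) : ∀ n i x y dx dy off,
    i ≤ (pvInnerP steps n i x y dx dy off).2.1 := by
  induction steps with
  | zero => intro n i x y dx dy off; simp [pvInnerP]
  | succ s ih =>
    intro n i x y dx dy off
    simp only [pvInnerP]
    split
    · simp
    · exact le_trans (by omega) (ih n (i+1) (x+dx) (y+dy) dx dy off)

lemma pvInnerP_i_lt (steps : Nat) (n i x y dx dy off : Int)
    (h : i < n) (hs : steps ≠ 0) : i < (pvInnerP steps n i x y dx dy off).2.1 := by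
  cases steps with
  | zero => exact absurd rfl hs
  | succ s =>
    simp only [pvInnerP]
    rw [if_neg (by omega)]
    exact lt_of_lt_of_le (by omega) (pvInnerP_i_le s n (i+1) (x+dx) (y+dy) dx dy off)

def pvOuterP (n i : Int) (seg : Nat) (x y off : Int) : List (Int × Int × Int) :=
  if h : i < n then
    let r := pvInnerP (seg / 2 + 1) n i x y (pvDirAt seg).1 (pvDirAt seg).2 off
    r.1 ++ pvOuterP n r.2.1 (seg + 1) r.2.2.1 r.2.2.2 off
  else []
termination_by (n - i).toNat
decreasing_by
  have := pvInnerP_i_lt (seg / 2 + 1) n i x y (pvDirAt seg).1 (pvDirAt seg).2 off h (by omega)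
  omega

-- keys emitted by the pure inner loop are < the returned i
lemma pvInnerP_key_lt (steps : Nat) : ∀ n i x y dx dy off p,
    p ∈ (pvInnerP steps n i x y dx dy off).1 → p.1 < (pvInnerP steps n i x y dx dy off).2.1 := by
  induction steps with
  | zero => intro n i x y dx dy off p hp; simp [pvInnerP] at hp
  | succ s ih =>
    intro n i x y dx dy off p hp
    simp only [pvInnerP] at hp ⊢
    by_cases hni : n ≤ i
    · rw [if_pos hni] at hp; simp at hp
    · rw [if_neg hni] at hp ⊢
      rcases List.mem_cons.mp hp with h | h
      · subst h
        exact lt_of_lt_of_le (by omega) (pvInnerP_i_le s n (i+1) (x+dx) (y+dy) dx dy off)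
      · exact ih n (i+1) (x+dx) (y+dy) dx dy off p h

lemma pvBInner_bridge (steps : Nat) : ∀ (n i x y dx dy off : Int) (d : PySem.Dict Int (Int × Int)), (∀ p ∈ d.items, p.1 < i) →
    (pvBInner steps n i x y dx dy off d).1.items
        = d.items ++ (pvInnerP steps n i x y dx dy off).1
      ∧ (pvBInner steps n i x y dx dy off d).2 = (pvInnerP steps n i x y dx dy off).2 := by
  induction steps with
  | zero => intro n i x y dx dy off d hd; simp [pvBInner, pvInnerP]
  | succ s ih =>
    intro n i x y dx dy off d hd
    simp only [pvBInner, pvInnerP]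
    by_cases hni : n ≤ i
    · rw [if_pos hni, if_pos hni]; simp
    · rw [if_neg hni, if_neg hni]
      have hnc : d.contains i = false := pvNotContains d i hd
      have hins := PySem.Dict.items_insert_of_not_contains d (x + dx + off, y + dy + off) hnc
      have hd' : ∀ p ∈ (d.insert i (x + dx + off, y + dy + off)).items, p.1 < i + 1 := by
        intro p hp
        rw [hins] at hp
        rcases List.mem_append.mp hp with h | h
        · exact lt_trans (hd p h) (by omega)
        · rw [List.mem_singleton] at h; subst h; exact (by omega : i < i + 1)
      obtain ⟨h1, h2⟩ := ih n (i+1) (x+dx) (y+dy) dx dy off _ hd'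
      refine ⟨?_, h2⟩
      rw [h1, hins]
      simp

lemma pvBOuter_unfold (n i : Int) (seg : Nat) (x y off : Int) (d : PySem.Dict Int (Int × Int))
    (h : i < n) :
    pvBOuter n i seg x y off d
      = pvBOuter n (pvBInner (seg / 2 + 1) n i x y (pvDirAt seg).1 (pvDirAt seg).2 off d).2.1
          (seg + 1) (pvBInner (seg / 2 + 1) n i x y (pvDirAt seg).1 (pvDirAt seg).2 off d).2.2.1
          (pvBInner (seg / 2 + 1) n i x y (pvDirAt seg).1 (pvDirAt seg).2 off d).2.2.2 off
          (pvBInner (seg / 2 + 1) n i x y (pvDirAt seg).1 (pvDirAt seg).2 off d).1 := by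
  rw [pvBOuter, dif_pos h]

lemma pvOuterP_unfold (n i : Int) (seg : Nat) (x y off : Int) (h : i < n) :
    pvOuterP n i seg x y off
      = (pvInnerP (seg / 2 + 1) n i x y (pvDirAt seg).1 (pvDirAt seg).2 off).1
        ++ pvOuterP n (pvInnerP (seg / 2 + 1) n i x y (pvDirAt seg).1 (pvDirAt seg).2 off).2.1
             (seg + 1) (pvInnerP (seg / 2 + 1) n i x y (pvDirAt seg).1 (pvDirAt seg).2 off).2.2.1
             (pvInnerP (seg / 2 + 1) n i x y (pvDirAt seg).1 (pvDirAt seg).2 off).2.2.2 off := by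
  rw [pvOuterP, dif_pos h]

lemma pvBOuter_bridge (f : Nat) : ∀ (n i : Int) (seg : Nat) (x y off : Int) (d : PySem.Dict Int (Int × Int)),
    f = (n - i).toNat → (∀ p ∈ d.items, p.1 < i) →
    (pvBOuter n i seg x y off d).items = d.items ++ pvOuterP n i seg x y off := by
  induction f using Nat.strong_induction_on with
  | _ f IH =>
    intro n i seg x y off d hf hd
    by_cases hni : i < n
    · rw [pvBOuter_unfold n i seg x y off d hni, pvOuterP_unfold n i seg x y off hni]
      obtain ⟨h1, h2⟩ := pvBInner_bridge (seg / 2 + 1) n i x y (pvDirAt seg).1 (pvDirAt seg).2 off d hd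
      have hilt : i < (pvInnerP (seg / 2 + 1) n i x y (pvDirAt seg).1 (pvDirAt seg).2 off).2.1 :=
        pvInnerP_i_lt _ n i x y _ _ off hni (by omega)
      have hd' : ∀ p ∈ (pvBInner (seg / 2 + 1) n i x y (pvDirAt seg).1 (pvDirAt seg).2 off d).1.items,
          p.1 < (pvInnerP (seg / 2 + 1) n i x y (pvDirAt seg).1 (pvDirAt seg).2 off).2.1 := by
        intro p hp
        rw [h1] at hp
        rcases List.mem_append.mp hp with h | h
        · exact lt_trans (hd p h) hilt
        · exact pvInnerP_key_lt _ n i x y _ _ off p h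
      rw [h2]
      rw [IH ((n - (pvInnerP (seg / 2 + 1) n i x y (pvDirAt seg).1 (pvDirAt seg).2 off).2.1).toNat)
        (by omega) n _ (seg+1) _ _ off _ rfl hd']
      rw [h1]
      simp
    · rw [pvBOuter, pvOuterP, dif_neg hni, dif_neg hni]
      simp

-- ===== spiral geometry =====
def pvL (seg : Nat) : Nat := seg / 2 + 1

def pvStart (seg : Nat) : Nat :=
  let m := seg / 4
  match seg % 4 with
  | 0 => 4*m*m + 2*m
  | 1 => 4*m*m + 4*m + 1
  | 2 => 4*m*m + 6*m + 2
  | _ => 4*m*m + 8*m + 4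

def pvDOut (seg : Nat) : Int × Int :=
  match seg % 4 with
  | 0 => (1, 0) | 1 => (0, 1) | 2 => (-1, 0) | _ => (0, -1)

def pvDIn (seg : Nat) : Int × Int := pvDOut (seg + 3)

def pvCorner (seg : Nat) : Int × Int :=
  let m : Int := (seg / 4 : Nat)
  match seg % 4 with
  | 0 => (-m, -m) | 1 => (m+1, -m) | 2 => (m+1, m+1) | _ => (-m-1, m+1)

def pvMid (seg j : Nat) : Int × Int :=
  ((pvCorner seg).1 + j * (pvDOut seg).1, (pvCorner seg).2 + j * (pvDOut seg).2)

lemma pvStep_turn (x y dx dy : Int) (h : x = y ∨ (x < 0 ∧ x = -y) ∨ (0 < x ∧ x = 1 - y)) :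
    pvStep (x, y, dx, dy) = (x + -dy, y + dx, -dy, dx) := by
  simp [pvStep, if_pos h]

lemma pvStep_straight (x y dx dy : Int) (h : ¬(x = y ∨ (x < 0 ∧ x = -y) ∨ (0 < x ∧ x = 1 - y))) :
    pvStep (x, y, dx, dy) = (x + dx, y + dy, dx, dy) := by
  simp only [pvStep, if_neg h]

lemma pvStart_eval0 (m : Nat) : pvStart (4*m+0) = 4*m*m + 2*m := by
  simp only [pvStart]; rw [show (4*m+0) % 4 = 0 from by omega, show (4*m+0) / 4 = m from by omega]

lemma pvStart_eval1 (m : Nat) : pvStart (4*m+1) = 4*m*m + 4*m + 1 := by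
  simp only [pvStart]; rw [show (4*m+1) % 4 = 1 from by omega, show (4*m+1) / 4 = m from by omega]

lemma pvStart_eval2 (m : Nat) : pvStart (4*m+2) = 4*m*m + 6*m + 2 := by
  simp only [pvStart]; rw [show (4*m+2) % 4 = 2 from by omega, show (4*m+2) / 4 = m from by omega]

lemma pvStart_eval3 (m : Nat) : pvStart (4*m+3) = 4*m*m + 8*m + 4 := by
  simp only [pvStart]; rw [show (4*m+3) % 4 = 3 from by omega, show (4*m+3) / 4 = m from by omega]

lemma pvStart_succ (seg : Nat) : pvStart (seg + 1) = pvStart seg + pvL seg := by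
  obtain ⟨m, c, hc, rfl⟩ : ∃ m c, c < 4 ∧ seg = 4*m + c := ⟨seg/4, seg%4, by omega, by omega⟩
  interval_cases c <;> simp only [pvStart, pvL]
  · rw [show (4*m+0+1) % 4 = 1 from by omega, show (4*m+0+1) / 4 = m from by omega,
      show (4*m+0) % 4 = 0 from by omega, show (4*m+0) / 4 = m from by omega,
      show (4*m+0) / 2 = 2*m from by omega]
    show 4*m*m + 4*m + 1 = 4*m*m + 2*m + (2*m + 1); ring
  · rw [show (4*m+1+1) % 4 = 2 from by omega, show (4*m+1+1) / 4 = m from by omega,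
      show (4*m+1) % 4 = 1 from by omega, show (4*m+1) / 4 = m from by omega,
      show (4*m+1) / 2 = 2*m from by omega]
    show 4*m*m + 6*m + 2 = 4*m*m + 4*m + 1 + (2*m + 1); ring
  · rw [show (4*m+2+1) % 4 = 3 from by omega, show (4*m+2+1) / 4 = m from by omega,
      show (4*m+2) % 4 = 2 from by omega, show (4*m+2) / 4 = m from by omega,
      show (4*m+2) / 2 = 2*m+1 from by omega]
    show 4*m*m + 8*m + 4 = 4*m*m + 6*m + 2 + (2*m + 1 + 1); ring
  · rw [show (4*m+3+1) % 4 = 0 from by omega, show (4*m+3+1) / 4 = m+1 from by omega,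
      show (4*m+3) % 4 = 3 from by omega, show (4*m+3) / 4 = m from by omega,
      show (4*m+3) / 2 = 2*m+1 from by omega]
    show 4*(m+1)*(m+1) + 2*(m+1) = 4*m*m + 8*m + 4 + (2*m + 1 + 1); ring

lemma pvCorner_succ (seg : Nat) : pvCorner (seg + 1) = pvMid seg (pvL seg) := by
  obtain ⟨m, c, hc, rfl⟩ : ∃ m c, c < 4 ∧ seg = 4*m + c := ⟨seg/4, seg%4, by omega, by omega⟩
  interval_cases c <;> simp only [pvCorner, pvMid, pvDOut, pvL]
  · rw [show (4*m+0+1) % 4 = 1 from by omega, show (4*m+0+1) / 4 = m from by omega,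
      show (4*m+0) % 4 = 0 from by omega, show (4*m+0) / 4 = m from by omega,
      show (4*m+0) / 2 = 2*m from by omega]
    show ((m:Int)+1, -(m:Int)) = (-(m:Int) + (2*m+1 : Nat) * 1, -(m:Int) + (2*m+1 : Nat) * 0)
    simp only [Prod.mk.injEq]; constructor <;> push_cast <;> ring
  · rw [show (4*m+1+1) % 4 = 2 from by omega, show (4*m+1+1) / 4 = m from by omega,
      show (4*m+1) % 4 = 1 from by omega, show (4*m+1) / 4 = m from by omega,
      show (4*m+1) / 2 = 2*m from by omega]
    show ((m:Int)+1, (m:Int)+1) = ((m:Int)+1 + (2*m+1 : Nat) * 0, -(m:Int) + (2*m+1 : Nat) * 1)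
    simp only [Prod.mk.injEq]; constructor <;> push_cast <;> ring
  · rw [show (4*m+2+1) % 4 = 3 from by omega, show (4*m+2+1) / 4 = m from by omega,
      show (4*m+2) % 4 = 2 from by omega, show (4*m+2) / 4 = m from by omega,
      show (4*m+2) / 2 = 2*m+1 from by omega]
    show (-(m:Int)-1, (m:Int)+1) = ((m:Int)+1 + (2*m+1+1 : Nat) * (-1), (m:Int)+1 + (2*m+1+1 : Nat) * 0)
    simp only [Prod.mk.injEq]; constructor <;> push_cast <;> ring
  · rw [show (4*m+3+1) % 4 = 0 from by omega, show (4*m+3+1) / 4 = m+1 from by omega,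
      show (4*m+3) % 4 = 3 from by omega, show (4*m+3) / 4 = m from by omega,
      show (4*m+3) / 2 = 2*m+1 from by omega]
    show ((-((m+1 : Nat) : Int)), (-((m+1 : Nat) : Int))) = (-(m:Int)-1 + ((2*m+1+1 : Nat) : Int) * 0, (m:Int)+1 + ((2*m+1+1 : Nat) : Int) * (-1))
    simp only [Prod.mk.injEq]; constructor <;> push_cast <;> ring

lemma pvDIn_succ (seg : Nat) : pvDIn (seg + 1) = pvDOut seg := by
  show pvDOut (seg + 1 + 3) = pvDOut seg
  simp only [pvDOut]
  rw [show (seg+1+3) % 4 = seg % 4 from by omega]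

lemma pvDOut_dir (seg : Nat) : pvDirAt seg = pvDOut seg := by
  have h : seg % 4 = 0 ∨ seg % 4 = 1 ∨ seg % 4 = 2 ∨ seg % 4 = 3 := by omega
  unfold pvDirAt
  rcases h with h | h | h | h <;> rw [h] <;> simp only [pvDOut] <;> rw [h] <;> decide

lemma pvTurn (seg : Nat) :
    pvStep ((pvCorner seg).1, (pvCorner seg).2, (pvDIn seg).1, (pvDIn seg).2)
      = ((pvMid seg 1).1, (pvMid seg 1).2, (pvDOut seg).1, (pvDOut seg).2) := by
  obtain ⟨m, c, hc, rfl⟩ : ∃ m c, c < 4 ∧ seg = 4*m + c := ⟨seg/4, seg%4, by omega, by omega⟩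
  interval_cases c <;> simp only [pvCorner, pvMid, pvDOut, pvDIn]
  · rw [show (4*m+0+3) % 4 = 3 from by omega, show (4*m+0) % 4 = 0 from by omega,
      show (4*m+0) / 4 = m from by omega]
    show pvStep (-(m:Int), -(m:Int), 0, -1) = (-(m:Int) + ((1:Nat):Int) * 1, -(m:Int) + ((1:Nat):Int) * 0, 1, 0)
    rw [pvStep_turn _ _ _ _ (by omega)]
    simp only [Prod.mk.injEq]
    and_intros <;> first | (push_cast; ring) | trivial
  · rw [show (4*m+1+3) % 4 = 0 from by omega, show (4*m+1) % 4 = 1 from by omega,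
      show (4*m+1) / 4 = m from by omega]
    show pvStep ((m:Int)+1, -(m:Int), 1, 0) = ((m:Int)+1 + ((1:Nat):Int) * 0, -(m:Int) + ((1:Nat):Int) * 1, 0, 1)
    rw [pvStep_turn _ _ _ _ (by omega)]
    simp only [Prod.mk.injEq]
    and_intros <;> first | (push_cast; ring) | trivial
  · rw [show (4*m+2+3) % 4 = 1 from by omega, show (4*m+2) % 4 = 2 from by omega,
      show (4*m+2) / 4 = m from by omega]
    show pvStep ((m:Int)+1, (m:Int)+1, 0, 1) = ((m:Int)+1 + ((1:Nat):Int) * (-1), (m:Int)+1 + ((1:Nat):Int) * 0, -1, 0)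
    rw [pvStep_turn _ _ _ _ (by omega)]
    simp only [Prod.mk.injEq]
    and_intros <;> first | (push_cast; ring) | trivial
  · rw [show (4*m+3+3) % 4 = 2 from by omega, show (4*m+3) % 4 = 3 from by omega,
      show (4*m+3) / 4 = m from by omega]
    show pvStep (-(m:Int)-1, (m:Int)+1, -1, 0) = (-(m:Int)-1 + ((1:Nat):Int) * 0, (m:Int)+1 + ((1:Nat):Int) * (-1), 0, -1)
    rw [pvStep_turn _ _ _ _ (by omega)]
    simp only [Prod.mk.injEq]
    and_intros <;> first | (push_cast; ring) | trivial

lemma pvNoTurn (seg j : Nat) (h1 : 1 ≤ j) (h2 : j < pvL seg) :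
    pvStep ((pvMid seg j).1, (pvMid seg j).2, (pvDOut seg).1, (pvDOut seg).2)
      = ((pvMid seg (j+1)).1, (pvMid seg (j+1)).2, (pvDOut seg).1, (pvDOut seg).2) := by
  simp only [pvL] at h2
  obtain ⟨m, c, hc, rfl⟩ : ∃ m c, c < 4 ∧ seg = 4*m + c := ⟨seg/4, seg%4, by omega, by omega⟩
  interval_cases c <;> simp only [pvCorner, pvMid, pvDOut]
  · rw [show (4*m+0) % 4 = 0 from by omega, show (4*m+0) / 4 = m from by omega]
    show pvStep (-(m:Int) + (j:Int) * 1, -(m:Int) + (j:Int) * 0, 1, 0) = (-(m:Int) + ((j+1:Nat):Int) * 1, -(m:Int) + ((j+1:Nat):Int) * 0, 1, 0)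
    rw [pvStep_straight _ _ _ _ (by simp only [mul_one, mul_zero, add_zero, mul_neg_one]; omega)]
    simp only [Prod.mk.injEq]
    and_intros <;> first | (push_cast; ring) | trivial
  · rw [show (4*m+1) % 4 = 1 from by omega, show (4*m+1) / 4 = m from by omega]
    show pvStep ((m:Int)+1 + (j:Int) * 0, -(m:Int) + (j:Int) * 1, 0, 1) = ((m:Int)+1 + ((j+1:Nat):Int) * 0, -(m:Int) + ((j+1:Nat):Int) * 1, 0, 1)
    rw [pvStep_straight _ _ _ _ (by simp only [mul_one, mul_zero, add_zero, mul_neg_one]; omega)]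
    simp only [Prod.mk.injEq]
    and_intros <;> first | (push_cast; ring) | trivial
  · rw [show (4*m+2) % 4 = 2 from by omega, show (4*m+2) / 4 = m from by omega]
    show pvStep ((m:Int)+1 + (j:Int) * (-1), (m:Int)+1 + (j:Int) * 0, -1, 0) = ((m:Int)+1 + ((j+1:Nat):Int) * (-1), (m:Int)+1 + ((j+1:Nat):Int) * 0, -1, 0)
    rw [pvStep_straight _ _ _ _ (by simp only [mul_one, mul_zero, add_zero, mul_neg_one]; omega)]
    simp only [Prod.mk.injEq]
    and_intros <;> first | (push_cast; ring) | trivial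
  · rw [show (4*m+3) % 4 = 3 from by omega, show (4*m+3) / 4 = m from by omega]
    show pvStep (-(m:Int)-1 + (j:Int) * 0, (m:Int)+1 + (j:Int) * (-1), 0, -1) = (-(m:Int)-1 + ((j+1:Nat):Int) * 0, (m:Int)+1 + ((j+1:Nat):Int) * (-1), 0, -1)
    rw [pvStep_straight _ _ _ _ (by simp only [mul_one, mul_zero, add_zero, mul_neg_one]; omega)]
    simp only [Prod.mk.injEq]
    and_intros <;> first | (push_cast; ring) | trivial

lemma pvStraight (seg : Nat) (t : Nat) : ∀ (j : Nat), 1 ≤ j → j + t ≤ pvL seg →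
    pvIter t ((pvMid seg j).1, (pvMid seg j).2, (pvDOut seg).1, (pvDOut seg).2)
      = ((pvMid seg (j+t)).1, (pvMid seg (j+t)).2, (pvDOut seg).1, (pvDOut seg).2) := by
  induction t with
  | zero => intro j h1 h2; rfl
  | succ t ih =>
    intro j h1 h2
    show pvIter t (pvStep _) = _
    rw [pvNoTurn seg j h1 (by omega), ih (j+1) (by omega) (by omega),
      show j + 1 + t = j + (t+1) from by omega]

lemma pvIterSeg (seg : Nat) :
    pvIter (pvL seg) ((pvMid seg 1).1, (pvMid seg 1).2, (pvDOut seg).1, (pvDOut seg).2)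
      = ((pvMid (seg+1) 1).1, (pvMid (seg+1) 1).2, (pvDOut (seg+1)).1, (pvDOut (seg+1)).2) := by
  have hL : pvL seg = (pvL seg - 1) + 1 := by simp [pvL]
  rw [hL, pvIter_succ', pvStraight seg (pvL seg - 1) 1 (by omega) (by omega)]
  rw [show 1 + (pvL seg - 1) = pvL seg from by omega]
  rw [← pvCorner_succ, ← pvDIn_succ seg]
  exact pvTurn (seg + 1)

lemma pvSqLt (a N idx : Int) (ha : 0 ≤ a) (h1 : a^2 ≤ idx) (h2 : idx < N^2) (hN : 0 ≤ N) :
    a < N := by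
  nlinarith

lemma pvGuard (N : Int) (hN : 1 ≤ N) (seg j : Nat) (h1 : 1 ≤ j) (h2 : j ≤ pvL seg)
    (hidx : ((pvStart seg : Int) + j) < N^2) :
    (-N < 2*(pvMid seg j).1 ∧ 2*(pvMid seg j).1 ≤ N)
      ∧ (-N < 2*(pvMid seg j).2 ∧ 2*(pvMid seg j).2 ≤ N) := by
  simp only [pvL] at h2
  obtain ⟨m, c, hc, rfl⟩ : ∃ m c, c < 4 ∧ seg = 4*m + c := ⟨seg/4, seg%4, by omega, by omega⟩
  have hM : (0:Int) ≤ (m:Int) := Int.natCast_nonneg m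
  have hJ1 : (1:Int) ≤ (j:Int) := by exact_mod_cast h1
  interval_cases c <;>
    simp only [pvMid, pvCorner, pvDOut] <;>
    [ (rw [pvStart_eval0] at hidx; rw [show (4*m+0) % 4 = 0 from by omega, show (4*m+0) / 4 = m from by omega]);
      (rw [pvStart_eval1] at hidx; rw [show (4*m+1) % 4 = 1 from by omega, show (4*m+1) / 4 = m from by omega]);
      (rw [pvStart_eval2] at hidx; rw [show (4*m+2) % 4 = 2 from by omega, show (4*m+2) / 4 = m from by omega]);
      (rw [pvStart_eval3] at hidx; rw [show (4*m+3) % 4 = 3 from by omega, show (4*m+3) / 4 = m from by omega])] <;>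
    simp only [mul_one, mul_zero, add_zero] <;>
    push_cast at hidx
  · -- c = 0
    have hJ2 : (j:Int) ≤ 2*(m:Int)+1 := by exact_mod_cast (by omega : j ≤ 2*m+1)
    refine ⟨⟨?_, ?_⟩, ?_, ?_⟩
    · by_cases h : (0:Int) ≤ -(m:Int) + (j:Int)
      · linarith
      · push_neg at h
        have ha := pvSqLt (2*((m:Int)-(j:Int))) N _ (by linarith)
          (by nlinarith [mul_nonneg (by linarith : (0:Int) ≤ (m:Int)-1-((m:Int)-(j:Int))) (by linarith : (0:Int) ≤ (m:Int)-1+((m:Int)-(j:Int)))]) hidx (by linarith)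
        linarith
    · by_cases h : (-(m:Int) + (j:Int)) ≤ 0
      · linarith
      · push_neg at h
        have ha := pvSqLt (2*((j:Int)-(m:Int))-1) N _ (by linarith)
          (by nlinarith [mul_nonneg (by linarith : (0:Int) ≤ ((j:Int)-(m:Int))-1) (by linarith : (0:Int) ≤ 2*(m:Int)+2-((j:Int)-(m:Int)))]) hidx (by linarith)
        linarith
    · have ha := pvSqLt (2*(m:Int)) N _ (by linarith)
          (by nlinarith) hidx (by linarith)
      linarith
    · linarith
  · -- c = 1
    have hJ2 : (j:Int) ≤ 2*(m:Int)+1 := by exact_mod_cast (by omega : j ≤ 2*m+1)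
    refine ⟨⟨?_, ?_⟩, ?_, ?_⟩
    · linarith
    · have ha := pvSqLt (2*(m:Int)+1) N _ (by linarith)
          (by nlinarith) hidx (by linarith)
      linarith
    · by_cases h : (0:Int) ≤ -(m:Int) + (j:Int)
      · linarith
      · push_neg at h
        have ha := pvSqLt (2*((m:Int)-(j:Int))) N _ (by linarith)
          (by nlinarith [mul_nonneg (by linarith : (0:Int) ≤ (m:Int)-1-((m:Int)-(j:Int))) (by linarith : (0:Int) ≤ (m:Int)-1+((m:Int)-(j:Int)))]) hidx (by linarith)
        linarith
    · by_cases h : (-(m:Int) + (j:Int)) ≤ 0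
      · linarith
      · push_neg at h
        have ha := pvSqLt (2*((j:Int)-(m:Int))-1) N _ (by linarith)
          (by nlinarith [mul_nonneg (by linarith : (0:Int) ≤ ((j:Int)-(m:Int))-1) (by linarith : (0:Int) ≤ 2*(m:Int)+2-((j:Int)-(m:Int)))]) hidx (by linarith)
        linarith
  · -- c = 2
    have hJ2 : (j:Int) ≤ 2*(m:Int)+2 := by exact_mod_cast (by omega : j ≤ 2*m+2)
    refine ⟨⟨?_, ?_⟩, ?_, ?_⟩
    · by_cases h : (0:Int) ≤ (m:Int)+1 - (j:Int)
      · linarith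
      · push_neg at h
        have ha := pvSqLt (2*((j:Int)-(m:Int)-1)) N _ (by linarith)
          (by nlinarith [mul_nonneg (by linarith : (0:Int) ≤ (m:Int)+1-((j:Int)-(m:Int)-1)) (by linarith : (0:Int) ≤ (m:Int)+1+((j:Int)-(m:Int)-1))]) hidx (by linarith)
        linarith
    · by_cases h : ((m:Int)+1 - (j:Int)) ≤ 0
      · linarith
      · push_neg at h
        have ha := pvSqLt (2*((m:Int)+1-(j:Int))-1) N _ (by linarith)
          (by nlinarith [mul_nonneg (by linarith : (0:Int) ≤ (m:Int)-((m:Int)+1-(j:Int))) (by linarith : (0:Int) ≤ (m:Int)+((m:Int)+1-(j:Int)))]) hidx (by linarith)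
        linarith
    · linarith
    · have ha := pvSqLt (2*(m:Int)+1) N _ (by linarith)
          (by nlinarith) hidx (by linarith)
      linarith
  · -- c = 3
    have hJ2 : (j:Int) ≤ 2*(m:Int)+2 := by exact_mod_cast (by omega : j ≤ 2*m+2)
    refine ⟨⟨?_, ?_⟩, ?_, ?_⟩
    · have ha := pvSqLt (2*(m:Int)+2) N _ (by linarith)
          (by nlinarith) hidx (by linarith)
      linarith
    · linarith
    · by_cases h : (0:Int) ≤ (m:Int)+1 - (j:Int)
      · linarith
      · push_neg at h
        have ha := pvSqLt (2*((j:Int)-(m:Int)-1)) N _ (by linarith)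
          (by nlinarith [mul_nonneg (by linarith : (0:Int) ≤ (m:Int)+1-((j:Int)-(m:Int)-1)) (by linarith : (0:Int) ≤ (m:Int)+1+((j:Int)-(m:Int)-1))]) hidx (by linarith)
        linarith
    · by_cases h : ((m:Int)+1 - (j:Int)) ≤ 0
      · linarith
      · push_neg at h
        have ha := pvSqLt (2*((m:Int)+1-(j:Int))-1) N _ (by linarith)
          (by nlinarith [mul_nonneg (by linarith : (0:Int) ≤ (m:Int)-((m:Int)+1-(j:Int))) (by linarith : (0:Int) ≤ (m:Int)+((m:Int)+1-(j:Int)))]) hidx (by linarith)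
        linarith

lemma pvMid_add_one (seg j : Nat) :
    (pvMid seg j).1 + (pvDOut seg).1 = (pvMid seg (j+1)).1
      ∧ (pvMid seg j).2 + (pvDOut seg).2 = (pvMid seg (j+1)).2 := by
  constructor <;> simp only [pvMid] <;> push_cast <;> ring

lemma pvInner (N n off : Int) (hn : n = N^2) (hN : 1 ≤ N) (hoff : off = pvCeilHalf N - 1)
    (seg : Nat) : ∀ (steps j : Nat) (i : Int), 1 ≤ j → j + steps ≤ pvL seg + 1 →
    i = (pvStart seg : Int) + j →
    pvInnerP steps n i (pvMid seg (j-1)).1 (pvMid seg (j-1)).2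
        (pvDOut seg).1 (pvDOut seg).2 off
      = (pvRunA N (min steps (n - i).toNat) i
           ((pvMid seg j).1, (pvMid seg j).2, (pvDOut seg).1, (pvDOut seg).2),
         i + min steps (n - i).toNat,
         (pvMid seg (j - 1 + min steps (n - i).toNat)).1,
         (pvMid seg (j - 1 + min steps (n - i).toNat)).2) := by
  intro steps
  induction steps with
  | zero =>
    intro j i h1 h2 hi
    simp [pvInnerP, pvRunA]
  | succ s ih =>
    intro j i h1 h2 hi
    obtain ⟨j', rfl⟩ : ∃ j', j = j' + 1 := ⟨j - 1, by omega⟩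
    simp only [Nat.add_sub_cancel]
    by_cases hni : n ≤ i
    · simp only [pvInnerP]
      rw [if_pos hni, show min (s+1) (n - i).toNat = 0 from by omega]
      simp [pvRunA]
    · simp only [pvInnerP]
      rw [if_neg hni]
      have hx := (pvMid_add_one seg j').1
      have hy := (pvMid_add_one seg j').2
      have hguard := pvGuard N hN seg (j'+1) (by omega) (by omega) (by rw [← hi, ← hn]; omega)
      rcases Nat.eq_zero_or_pos s with rfl | hs
      · rw [show min (0+1) (n - i).toNat = 0 + 1 from by omega]
        simp only [pvInnerP, pvRunA]
        rw [if_pos hguard, hx, hy]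
        simp only [Prod.mk.injEq, List.cons_append, List.nil_append, List.cons.injEq]
        and_intros <;>
          first
            | rfl
            | (rw [hoff]; push_cast; ring)
            | (push_cast; ring)
            | (congr 1; omega)
            | trivial
      · have hc : min (s+1) (n - i).toNat = (min s (n - (i+1)).toNat) + 1 := by omega
        rw [hc]
        simp only [pvRunA]
        rw [if_pos hguard, pvNoTurn seg (j'+1) (by omega) (by omega)]
        have hih := ih (j'+2) (i+1) (by omega) (by omega) (by rw [hi]; push_cast; ring)
        simp only [show j'+2-1 = j'+1 from by omega] at hih
        rw [hx, hy, hih]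
        simp only [Nat.add_sub_cancel, Prod.mk.injEq, List.cons_append, List.nil_append,
          List.cons.injEq]
        and_intros <;>
          first
            | rfl
            | (rw [hoff]; push_cast; ring)
            | (push_cast; ring)
            | (congr 1; omega)
            | trivial

lemma pvMid_zero (seg : Nat) :
    (pvMid seg 0).1 = (pvCorner seg).1 ∧ (pvMid seg 0).2 = (pvCorner seg).2 := by
  constructor <;> simp [pvMid]

lemma pvMain (N n : Int) (hn : n = N^2) (hN : 1 ≤ N) : ∀ (f seg : Nat) (i : Int),
    i = (pvStart seg : Int) + 1 → i ≤ n → f = (n - i).toNat →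
    pvRunA N ((n - i).toNat) i ((pvMid seg 1).1, (pvMid seg 1).2, (pvDOut seg).1, (pvDOut seg).2)
      = pvOuterP n i seg (pvCorner seg).1 (pvCorner seg).2 (pvCeilHalf N - 1) := by
  intro f
  induction f using Nat.strong_induction_on with
  | _ f IH =>
    intro seg i hi hin hf
    rcases eq_or_lt_of_le hin with rfl | hlt
    · rw [show (i - i).toNat = 0 from by omega, pvOuterP, dif_neg (lt_irrefl i)]
      rfl
    · rw [pvOuterP_unfold n i seg _ _ _ hlt, pvDOut_dir]
      rw [← (pvMid_zero seg).1, ← (pvMid_zero seg).2]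
      have hinner := pvInner N n (pvCeilHalf N - 1) hn hN rfl seg (seg/2+1) 1 i
        (le_refl 1) (by simp only [pvL]; omega) (by rw [hi]; push_cast; ring)
      simp only [show (1:Nat) - 1 = 0 from rfl, Nat.zero_add] at hinner
      rw [hinner]
      have hL : pvL seg = seg / 2 + 1 := rfl
      have hL1 : 1 ≤ pvL seg := by omega
      by_cases hfull : (n - i).toNat ≤ pvL seg
      · -- last, possibly truncated segment: the walk ends here
        rw [show min (seg/2+1) (n - i).toNat = (n - i).toNat from by omega]
        rw [pvOuterP, dif_neg (show ¬ (i + ((n - i).toNat : Int) < n) from by omega)]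
        simp
      · -- full segment, recurse on the next one
        rw [show min (seg/2+1) (n - i).toNat = pvL seg from by omega]
        have hsplit : (n - i).toNat = pvL seg + (n - (i + ((pvL seg : Nat) : Int))).toNat := by omega
        rw [hsplit, pvRunA_add, pvIterSeg seg]
        have hIH := IH ((n - (i + ((pvL seg : Nat) : Int))).toNat) (by omega) (seg+1)
          (i + ((pvL seg : Nat) : Int))
          (by rw [hi, pvStart_succ seg]; push_cast; ring) (by omega) rfl
        rw [hIH]
        simp only [show pvMid seg (pvL seg) = pvCorner (seg+1) from (pvCorner_succ seg).symm]

lemma pvRunA_nonpos (N : Int) (hN : N ≤ 0) (k : Nat) : ∀ a s, pvRunA N k a s = [] := by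
  induction k with
  | zero => intro a s; rfl
  | succ k ih =>
    intro a s
    simp only [pvRunA, ih]
    rw [if_neg (by omega)]
    rfl

-- ===== VERDICT =====
theorem gen_spiral_spec : Claim_equal_gen_spiral := by
  intro N _
  show gen_spiral N = gen_spiral_alt N
  by_cases hN : 1 ≤ N
  · -- N ≥ 1: both sides emit cell 0 at the centre offset, then walk the spiral
    have hn1 : (1:Int) ≤ N^2 := by nlinarith
    rw [gen_spiral_eq_runA]
    have hk : (N ^ 2).toNat = (N^2 - 1).toNat + 1 := by omega
    rw [hk]
    simp only [pvRunA]
    rw [if_pos (by norm_num; omega : (-N < 2*((0:Int),(0:Int),(0:Int),(-1:Int)).1 ∧ 2*((0:Int),(0:Int),(0:Int),(-1:Int)).1 ≤ N) ∧ (-N < 2*((0:Int),(0:Int),(0:Int),(-1:Int)).2.1 ∧ 2*((0:Int),(0:Int),(0:Int),(-1:Int)).2.1 ≤ N))]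
    rw [show pvStep ((0:Int),(0:Int),(0:Int),(-1:Int)) = ((pvMid 0 1).1, (pvMid 0 1).2, (pvDOut 0).1, (pvDOut 0).2) from by decide]
    have hMain := pvMain N (N^2) rfl hN ((N^2 - 1).toNat) 0 1 (by decide) (by nlinarith) (by norm_num)
    rw [show (0:Int) + 1 = 1 from by norm_num, hMain]
    -- B side
    rw [gen_spiral_alt_eq, max_eq_left (by omega : (0:Int) ≤ N)]
    rw [if_pos (by nlinarith : (0:Int) < N^2)]
    simp only [Prod.fst, Prod.snd]
    have hd0 : ((PySem.Dict.empty : PySem.Dict Int (Int × Int)).insert 0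
        (0 + (pvCeilHalf N - 1), 0 + (pvCeilHalf N - 1))).items
        = [((0:Int), ((0:Int) + (pvCeilHalf N - 1), (0:Int) + (pvCeilHalf N - 1)))] := by
      rw [PySem.Dict.items_insert_of_not_contains _ _ (by simp)]
      rfl
    rw [pvBOuter_bridge ((N^2 - 1).toNat) (N^2) 1 0 0 0 (pvCeilHalf N - 1) _ (by omega)
      (by rw [hd0]; intro p hp; rw [List.mem_singleton] at hp; subst hp; norm_num)]
    rw [hd0]
    rw [show (pvCorner 0).1 = (0:Int) from by decide, show (pvCorner 0).2 = (0:Int) from by decide]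
    simp only [List.cons_append, List.nil_append, List.cons.injEq, Prod.mk.injEq]
    and_intros <;> first | rfl | ring | trivial
  · -- N ≤ 0: A's box test never fires, B's cell count is zero
    rw [gen_spiral_eq_runA, pvRunA_nonpos N (by omega) _ _ _]
    rw [gen_spiral_alt_eq, max_eq_right (by omega : N ≤ 0), show ((0:Int))^2 = 0 from by norm_num]
    rw [if_neg (by norm_num : ¬ (0:Int) < 0)]
    simp only [Prod.fst, Prod.snd]
    rw [pvBOuter, dif_neg (lt_irrefl 0)]
    rfl
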